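-- pv_equiv track=rewrite | github.com/intelxed/xed | pysrc/tup2int.py | tuple2int
-- ===== SOURCE A (Python) =====
-- def tuple2int(t, cnames, op_widths_dict):
--     """Convert list of values in the input parameter t to a hash key by
--        shifting and adding (OR'ing really) the values together. Must
--        factor in the max width of each field. The max width of each
--        component comes from the cnames and op_widths_dict parameters).
--     """
--     res = 0
--     bit_shift = 0
--     for i,byte in enumerate(t):
--         opwidth = op_widths_dict[cnames[i]]
--         res += byte << bit_shift
--         bit_shift += opwidth
--     return res
-- ===== SOURCE B (Python) =====
-- def tuple2int(t, cnames, op_widths_dict):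
--     # Horner-style: fold the fields back-to-front, shifting the running
--     # result by each field's width instead of tracking absolute offsets.
--     res = 0
--     for byte, name in reversed(list(zip(t, cnames))):
--         res = (res << op_widths_dict[name]) + byte
--     return res
-- ===== Notes on version B (the rewrite author's own statement) =====
-- stated objective: alternative
-- what changed: Replaces the forward loop with two accumulators (result and absolute bit offset) by a Horner-style backward fold over zip(t, cnames) that keeps only the running result, shifting it by each field's width.
-- outside the precondition, e.g. on tuple2int([1], ['a'], {'a': -5}): A returns 1, B raises ValueError
import Mathlib
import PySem

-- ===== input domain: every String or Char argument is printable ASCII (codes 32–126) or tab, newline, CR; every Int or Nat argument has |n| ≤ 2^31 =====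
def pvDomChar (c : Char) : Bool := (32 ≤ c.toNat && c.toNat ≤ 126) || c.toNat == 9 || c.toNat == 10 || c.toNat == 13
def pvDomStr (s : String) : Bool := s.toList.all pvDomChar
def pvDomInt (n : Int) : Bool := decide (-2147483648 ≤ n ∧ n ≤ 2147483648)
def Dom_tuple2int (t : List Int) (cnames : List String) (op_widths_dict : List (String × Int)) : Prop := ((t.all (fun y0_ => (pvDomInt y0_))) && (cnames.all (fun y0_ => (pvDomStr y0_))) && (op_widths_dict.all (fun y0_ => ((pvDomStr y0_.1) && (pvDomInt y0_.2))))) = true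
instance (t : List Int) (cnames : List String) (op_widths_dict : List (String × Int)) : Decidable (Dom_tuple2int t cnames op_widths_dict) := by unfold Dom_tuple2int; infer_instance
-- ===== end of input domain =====

-- B replaces A's forward loop with two accumulators (result + absolute bit offset) by a
-- Horner-style backward fold over zip(t, cnames) keeping only the running result (objective: alternative).

-- ===== PORT A =====
-- forward loop: index i, running result `res`, running absolute offset `bit_shift`;
-- `byte << bit_shift` is ported as `byte * 2 ^ bit_shift.toNat` (exact since Pre_ gives bit_shift ≥ 0)
def tuple2intGo (cnames : List String) (d : List (String × Int)) :
    List Int → Nat → Int → Int → Int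
  | [], _, res, _ => res
  | byte :: rest, i, res, bit_shift =>
    let opwidth := (PySem.Dict.get? (PySem.Dict.mk d)
        ((PySem.List.pyGet? cnames (i : Int)).getD "")).getD 0
    tuple2intGo cnames d rest (i+1) (res + byte * 2 ^ bit_shift.toNat) (bit_shift + opwidth)

def tuple2int (t : List Int) (cnames : List String) (op_widths_dict : List (String × Int)) : Int :=
  tuple2intGo cnames op_widths_dict t 0 0 0

-- ===== PORT B =====
-- Horner fold over reversed(list(zip(t, cnames))); `res << w` ported as `res * 2 ^ w.toNat`
-- (exact since Pre_ gives w ≥ 0)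
def tuple2int_alt (t : List Int) (cnames : List String) (op_widths_dict : List (String × Int)) : Int :=
  ((t.zip cnames).reverse).foldl
    (fun res p =>
      res * 2 ^ ((PySem.Dict.get? (PySem.Dict.mk op_widths_dict) p.2).getD 0).toNat + p.1) 0

-- ===== PRECONDITION & SPEC =====
-- Pre_ excludes inputs where A raises (cnames shorter than t → IndexError; a name of a used
-- field missing from the dict → KeyError; a negative accumulated shift → ValueError) and, in
-- addition, inputs where some used field has a negative width: there A may still return (when
-- only the LAST width is negative the shift it feeds is never executed) but B's own shift
-- raises ValueError, so those inputs are excluded rather than matched.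
def Pre_tuple2int (t : List Int) (cnames : List String) (op_widths_dict : List (String × Int)) : Prop :=
  t.length ≤ cnames.length ∧
  ∀ name ∈ cnames.take t.length,
    (PySem.Dict.get? (PySem.Dict.mk op_widths_dict) name).isSome = true ∧
    0 ≤ (PySem.Dict.get? (PySem.Dict.mk op_widths_dict) name).getD 0
instance (t : List Int) (cnames : List String) (op_widths_dict : List (String × Int)) : Decidable (Pre_tuple2int t cnames op_widths_dict) := by unfold Pre_tuple2int; infer_instance

def pvWitness_tuple2int : List Int × List String × (List (String × Int)) :=
  ([1, 2], ["a", "b"], [("a", 3), ("b", 4)])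

def Spec_tuple2int (t : List Int) (cnames : List String) (op_widths_dict : List (String × Int)) (out : Int) : Prop := out = tuple2int_alt t cnames op_widths_dict
instance (t : List Int) (cnames : List String) (op_widths_dict : List (String × Int)) (out : Int) : Decidable (Spec_tuple2int t cnames op_widths_dict out) := by unfold Spec_tuple2int; infer_instance

-- ===== CLAIM (what is proved, stated in full; the proofs are below) =====
def Claim_equal_tuple2int : Prop := ∀ (t : List Int) (cnames : List String) (op_widths_dict : List (String × Int)), Dom_tuple2int t cnames op_widths_dict → Pre_tuple2int t cnames op_widths_dict → Spec_tuple2int t cnames op_widths_dict (tuple2int t cnames op_widths_dict)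

-- ===== LEMMAS AND PROOFS =====

-- invariant of A's loop: with nonnegative shift and nonnegative widths for the remaining
-- fields, the forward accumulator loop equals `res + 2^shift * (Horner value of the rest)`
lemma tuple2intGo_eq (cnames : List String) (d : List (String × Int)) :
    ∀ (l : List Int) (i : Nat) (res shift : Int),
      0 ≤ shift →
      i + l.length ≤ cnames.length →
      (∀ name ∈ (cnames.drop i).take l.length,
          0 ≤ (PySem.Dict.get? (PySem.Dict.mk d) name).getD 0) →
      tuple2intGo cnames d l i res shift
        = res + 2 ^ shift.toNat *
            ((l.zip (cnames.drop i)).foldr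
              (fun p acc =>
                acc * 2 ^ ((PySem.Dict.get? (PySem.Dict.mk d) p.2).getD 0).toNat + p.1) 0) := by
  intro l
  induction l with
  | nil => intro i res shift _ _ _; simp [tuple2intGo]
  | cons b rest ih =>
    intro i res shift hs hlen hw
    have hi : i < cnames.length := by simp at hlen; omega
    have hd : cnames.drop i = cnames[i] :: cnames.drop (i + 1) :=
      List.drop_eq_getElem_cons hi
    have htake : List.take (b :: rest).length (cnames.drop i)
        = cnames[i] :: List.take rest.length (cnames.drop (i + 1)) := by
      rw [hd]; rfl
    have hwhead : 0 ≤ (PySem.Dict.get? (PySem.Dict.mk d) cnames[i]).getD 0 := by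
      apply hw; rw [htake]; exact List.mem_cons_self
    set w := (PySem.Dict.get? (PySem.Dict.mk d) cnames[i]).getD 0 with hwdef
    have step : tuple2intGo cnames d (b :: rest) i res shift
        = tuple2intGo cnames d rest (i + 1) (res + b * 2 ^ shift.toNat) (shift + w) := by
      simp [tuple2intGo, List.getElem?_eq_getElem hi]
      rw [hwdef]
    rw [step, ih (i + 1) _ _ (by omega) (by simp at hlen ⊢; omega)
        (by intro name hn; apply hw; rw [htake]; exact List.mem_cons_of_mem _ hn)]
    rw [hd]
    simp only [List.zip_cons_cons, List.foldr_cons]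
    have htn : (shift + w).toNat = shift.toNat + w.toNat := by omega
    rw [htn, pow_add]
    ring

lemma alt_eq_foldr (t : List Int) (cnames : List String) (d : List (String × Int)) :
    tuple2int_alt t cnames d
      = (t.zip cnames).foldr
          (fun p acc =>
            acc * 2 ^ ((PySem.Dict.get? (PySem.Dict.mk d) p.2).getD 0).toNat + p.1) 0 := by
  simp [tuple2int_alt, List.foldl_reverse]

-- ===== VERDICT (by name: the statement is the Claim_ definition above) =====
theorem tuple2int_spec : Claim_equal_tuple2int := by
  intro t cnames d _ hpre
  unfold Spec_tuple2int
  have h := tuple2intGo_eq cnames d t 0 0 0 le_rfl (by simpa using hpre.1)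
    (by intro name hn; exact (hpre.2 name (by simpa using hn)).2)
  rw [tuple2int, h, alt_eq_foldr]
  simp
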